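-- pv_equiv track=rewrite | github.com/henry-r18/advent-of-code-2025 | day-01/main.py | execute_rotation_sequence
-- ===== SOURCE A (Python) =====
-- DIAL_TICK_COUNT = 100  # There are 100 ticks on the dial (0-99)
--
-- def rotate_dial(
--     starting_position: int,
--     increment: int,
--     tick_count: int = DIAL_TICK_COUNT,
-- ) -> tuple[int, int]:
--     """Given a starting position on the dial,
--     return the new position after rotating the dial.
--
--     :param starting_position: The starting position on the dial.
--     :param increment: The increment to apply using modulus operator.
--     :param tick_count: The number of ticks on the dial.
--     :return: The new position after rotating the dial,
--         and the number of times the dial passes or lands on 0 during this turn.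
--     """
--     times_position_at_zero = 0
--
--     # If the increment is negative,
--     # use the modulus of the difference between the tick count and the starting position,
--     # plus the absolute value of the increment, divided by the tick count
--     # to calculate the number of times the dial passes or lands on 0.
--     # This avoids the issue of negative increments larger than the tick count counting twice,
--     # when they should only count once. Consider the case starting at 0 and incrementing by -110
--     # to see why the calculation for positive increments is not sufficient.
--     if increment < 0:
--         times_position_at_zero += (
--             (tick_count - starting_position) % tick_count + abs(increment)
--         ) // tick_count
--     else:
--         times_position_at_zero += (starting_position + increment) // tick_count
--     # Calculate the new position after rotating the dial
--     # by taking the modulus of the sum of the starting position and the increment.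
--     new_position = (starting_position + increment) % tick_count
--
--     return new_position, times_position_at_zero
--
-- def execute_rotation_sequence(
--     starting_position: int,
--     rotation_sequence: list[int],
-- ) -> tuple[list[int], int]:
--     """Executes the rotation sequence listed in the input file,
--     from the given starting position.
--
--     :param starting_position: Starting position for the dial.
--     :param rotation_sequence: Increments to apply to dial.
--     :return: The list of positions after each rotation,
--         and the total number of times the dial passes or lands on 0 during the sequence.
--     """
--     rotation_results = []
--     total_times_position_at_zero = 0
--     for increment in rotation_sequence:
--         new_position, times_position_at_zero = rotate_dial(starting_position, increment)
--         rotation_results.append(new_position)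
--         starting_position = new_position
--         total_times_position_at_zero += times_position_at_zero
--     return rotation_results, total_times_position_at_zero
-- ===== SOURCE B (Python) =====
-- DIAL_TICK_COUNT = 100  # There are 100 ticks on the dial (0-99)
--
--
-- def execute_rotation_sequence(starting_position, rotation_sequence):
--     """Prefix-sum decomposition: compute all positions from cumulative sums,
--     then count zero-crossings in a separate second scan."""
--     n = DIAL_TICK_COUNT
--     # Pass 1: positions are the running sums taken mod the tick count.
--     sums = []
--     s = starting_position
--     for inc in rotation_sequence:
--         s += inc
--         sums.append(s)
--     positions = [c % n for c in sums]
--     # Pass 2: crossings, from consecutive (previous position, increment) pairs.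
--     prevs = [starting_position] + positions[:-1]
--     total = 0
--     for prev, inc in zip(prevs, rotation_sequence):
--         if inc < 0:
--             total += ((n - prev) % n + abs(inc)) // n
--         else:
--             total += (prev + inc) // n
--     return positions, total
-- ===== Notes on version B (the rewrite author's own statement) =====
-- stated objective: alternative
-- what changed: A threads position, result list and crossing total through one loop via rotate_dial; B first builds a prefix-sum table and takes the positions as those sums mod 100, then counts zero-crossings in a separate second scan over (previous position, increment) pairs.
import Mathlib
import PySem

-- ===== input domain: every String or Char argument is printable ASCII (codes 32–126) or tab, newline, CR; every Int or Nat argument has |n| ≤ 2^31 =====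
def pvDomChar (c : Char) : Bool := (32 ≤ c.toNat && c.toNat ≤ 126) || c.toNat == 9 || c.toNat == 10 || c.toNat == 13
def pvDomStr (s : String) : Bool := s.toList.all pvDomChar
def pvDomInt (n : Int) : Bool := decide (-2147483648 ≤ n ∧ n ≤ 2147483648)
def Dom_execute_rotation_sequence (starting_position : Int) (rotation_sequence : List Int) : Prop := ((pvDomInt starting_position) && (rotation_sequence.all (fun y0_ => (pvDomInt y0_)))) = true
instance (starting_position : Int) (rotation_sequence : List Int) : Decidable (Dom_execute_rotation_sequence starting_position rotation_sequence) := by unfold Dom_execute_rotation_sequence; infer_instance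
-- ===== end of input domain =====

-- B replaces A's single loop (threading position, list and count through rotate_dial) by a
-- prefix-sum table for the positions plus a separate second scan for the zero-crossing count;
-- objective: alternative decomposition, same cost.


-- ===== PORT A =====
def rotate_dial (starting_position increment tick_count : Int) : Int × Int :=
  let times_position_at_zero : Int := 0
  let times_position_at_zero :=
    if increment < 0 then
      times_position_at_zero +
        PySem.Int.floordiv
          (PySem.Int.mod (tick_count - starting_position) tick_count + |increment|) tick_count
    else
      times_position_at_zero + PySem.Int.floordiv (starting_position + increment) tick_count
  let new_position := PySem.Int.mod (starting_position + increment) tick_count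
  (new_position, times_position_at_zero)

-- the loop body (append new position, add this step's count, advance the position)
def pvStepA (st : List Int × Int × Int) (increment : Int) : List Int × Int × Int :=
  let r := rotate_dial st.2.2 increment 100
  (st.1 ++ [r.1], st.2.1 + r.2, r.1)

def execute_rotation_sequence (starting_position : Int) (rotation_sequence : List Int) : List Int × Int :=
  let st := rotation_sequence.foldl pvStepA ([], 0, starting_position)
  (st.1, st.2.1)

-- ===== PORT B =====
-- running sums of the increments starting from s (Python's first loop building `sums`)
def pvCumsum (s : Int) : List Int → List Int
  | [] => []
  | x :: xs => (s + x) :: pvCumsum (s + x) xs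

-- crossing count of one step (the body of B's second loop)
def pvCross (n prev inc : Int) : Int :=
  if inc < 0 then PySem.Int.floordiv (PySem.Int.mod (n - prev) n + |inc|) n
  else PySem.Int.floordiv (prev + inc) n

def execute_rotation_sequence_alt (starting_position : Int) (rotation_sequence : List Int) : List Int × Int :=
  let sums := pvCumsum starting_position rotation_sequence
  let positions := sums.map (fun c => PySem.Int.mod c 100)
  let prevs := starting_position :: positions.dropLast
  let total := (prevs.zip rotation_sequence).foldl (fun acc pi => acc + pvCross 100 pi.1 pi.2) 0
  (positions, total)

-- ===== PRECONDITION & SPEC =====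
def Spec_execute_rotation_sequence (starting_position : Int) (rotation_sequence : List Int) (out : List Int × Int) : Prop := out = execute_rotation_sequence_alt starting_position rotation_sequence
instance (starting_position : Int) (rotation_sequence : List Int) (out : List Int × Int) : Decidable (Spec_execute_rotation_sequence starting_position rotation_sequence out) := by unfold Spec_execute_rotation_sequence; infer_instance

-- ===== CLAIM (what is proved, stated in full; the proofs are below) =====
def Claim_equal_execute_rotation_sequence : Prop := ∀ (starting_position : Int) (rotation_sequence : List Int), Dom_execute_rotation_sequence starting_position rotation_sequence → Spec_execute_rotation_sequence starting_position rotation_sequence (execute_rotation_sequence starting_position rotation_sequence)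

-- ===== LEMMAS AND PROOFS =====

-- reference shapes: positions, total and final position as structural recursions
def pvPpos (s : Int) : List Int → List Int
  | [] => []
  | x :: xs => PySem.Int.mod (s + x) 100 :: pvPpos (PySem.Int.mod (s + x) 100) xs

def pvTcnt (s : Int) : List Int → Int
  | [] => 0
  | x :: xs => pvCross 100 s x + pvTcnt (PySem.Int.mod (s + x) 100) xs

def pvEnd (s : Int) : List Int → Int
  | [] => s
  | x :: xs => pvEnd (PySem.Int.mod (s + x) 100) xs

lemma pvMod100 (a : Int) : PySem.Int.mod a 100 = a % 100 :=
  PySem.Int.mod_eq_emod_of_pos (by norm_num)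

lemma loopA (l : List Int) : ∀ (rs : List Int) (t s : Int),
    l.foldl pvStepA (rs, t, s)
    = (rs ++ pvPpos s l, t + pvTcnt s l, pvEnd s l) := by
  induction l with
  | nil => intro rs t s; simp [pvPpos, pvTcnt, pvEnd]
  | cons x xs ih =>
      intro rs t s
      have hstep : pvStepA (rs, t, s) x
          = (rs ++ [PySem.Int.mod (s + x) 100], t + pvCross 100 s x,
             PySem.Int.mod (s + x) 100) := by
        simp [pvStepA, rotate_dial, pvCross]
      rw [List.foldl_cons, hstep, ih]
      simp [pvPpos, pvTcnt, pvEnd, List.append_assoc, add_assoc]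

lemma cumsum_mod (l : List Int) : ∀ (s s' : Int),
    s' % 100 = s % 100 →
    (pvCumsum s l).map (fun c => PySem.Int.mod c 100) = pvPpos s' l := by
  induction l with
  | nil => intro s s' _; simp [pvCumsum, pvPpos]
  | cons x xs ih =>
      intro s s' h
      simp only [pvCumsum, pvPpos, List.map_cons, List.cons.injEq]
      refine ⟨by simp only [pvMod100]; omega, ih _ _ (by simp only [pvMod100]; omega)⟩

lemma crossings_scan (l : List Int) : ∀ (p0 acc : Int),
    (((p0 :: (pvPpos p0 l).dropLast).zip l).foldl
      (fun acc pi => acc + pvCross 100 pi.1 pi.2) acc)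
    = acc + pvTcnt p0 l := by
  induction l with
  | nil => intro p0 acc; simp [pvTcnt]
  | cons x xs ih =>
      intro p0 acc
      cases xs with
      | nil => simp [pvPpos, pvTcnt]
      | cons y ys =>
          rw [show pvPpos p0 (x :: y :: ys)
                = PySem.Int.mod (p0 + x) 100
                  :: pvPpos (PySem.Int.mod (p0 + x) 100) (y :: ys) from rfl,
             List.dropLast_cons_of_ne_nil (by simp [pvPpos]),
             List.zip_cons_cons, List.foldl_cons, ih]
          simp only [pvTcnt]
          ring

-- ===== VERDICT (by name: the statement is the Claim_ definition above) =====
theorem execute_rotation_sequence_spec : Claim_equal_execute_rotation_sequence := by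
  intro sp seq _
  unfold Spec_execute_rotation_sequence execute_rotation_sequence execute_rotation_sequence_alt
  simp only [loopA, cumsum_mod seq sp sp rfl, crossings_scan]
  simp
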